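-- pv_equiv track=rewrite | github.com/EvilBwala/ML_MPS | tRSSA_1D_Ising_Chain.py | bits_patterns
-- ===== SOURCE A (Python) =====
-- def bits_patterns(n):
--     '''
--     Generate all patterns of 1&-1's of size n
--     '''
--     ps = ['-1', '1']
--     for i in range(n-1):
--         ps_temp = []
--         for i in range(len(ps)):
--             ps_temp.append(ps[i]+'-1')
--             ps_temp.append(ps[i]+'1')
--         ps = ps_temp
--     return ps
-- ===== SOURCE B (Python) =====
-- def bits_patterns(n):
--     '''
--     Generate all patterns of 1&-1's of size n
--     '''
--     if n <= 1:
--         return ['-1', '1']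
--     return [p + s for p in bits_patterns(n - 1) for s in ('-1', '1')]
-- ===== Notes on version B (the rewrite author's own statement) =====
-- stated objective: simpler
-- what changed: Replaced the iterative doubling loop with a mutable work list by a direct recursive definition: patterns(n) = [p+s for p in patterns(n-1) for s in ('-1','1')], base case ['-1','1'] for n <= 1.
import Mathlib
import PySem

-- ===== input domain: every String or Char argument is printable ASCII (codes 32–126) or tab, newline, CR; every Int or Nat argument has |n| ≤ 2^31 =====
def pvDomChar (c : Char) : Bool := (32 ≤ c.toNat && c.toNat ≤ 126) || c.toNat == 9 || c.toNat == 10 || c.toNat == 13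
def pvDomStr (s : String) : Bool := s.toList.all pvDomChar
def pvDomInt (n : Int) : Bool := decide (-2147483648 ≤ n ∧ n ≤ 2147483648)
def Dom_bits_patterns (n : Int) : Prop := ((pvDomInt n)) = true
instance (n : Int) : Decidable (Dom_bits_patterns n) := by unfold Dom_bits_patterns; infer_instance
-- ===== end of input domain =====

-- B replaces A's iterative doubling loop by a direct recursion on n (simpler decomposition, same cost).

-- ===== PORT A =====
-- for i in range(n-1): rebuild ps by appending ps[i]+'-1' and ps[i]+'1' for each index.
-- Python's list is ported as Array (O(1) append/index, like Python's list); 'i.toNat' is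
-- exact here since i runs over range(len(ps)) and is never negative.
def bits_patterns (n : Int) : List String :=
  ((PySem.List.pyRange 0 (n - 1) 1).foldl
    (fun ps _ =>
      (PySem.List.pyRange 0 (ps.size : Int) 1).foldl
        (fun ps_temp i =>
          (ps_temp.push (ps.getD i.toNat "" ++ "-1")).push (ps.getD i.toNat "" ++ "1"))
        #[])
    #["-1", "1"]).toList

-- ===== PORT B =====
-- recursion on the (nonnegative part of the) size; base case covers n <= 1
def bitsPatternsAux : Nat → List String
  | 0 => ["-1", "1"]
  | 1 => ["-1", "1"]
  | m + 2 => (bitsPatternsAux (m + 1)).flatMap (fun p => [p ++ "-1", p ++ "1"])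

def bits_patterns_alt (n : Int) : List String :=
  bitsPatternsAux n.toNat

-- ===== PRECONDITION & SPEC =====
def Spec_bits_patterns (n : Int) (out : List String) : Prop := out = bits_patterns_alt n
instance (n : Int) (out : List String) : Decidable (Spec_bits_patterns n out) := by unfold Spec_bits_patterns; infer_instance

-- ===== CLAIM (what is proved, stated in full; the proofs are below) =====
def Claim_equal_bits_patterns : Prop := ∀ (n : Int), Dom_bits_patterns n → Spec_bits_patterns n (bits_patterns n)

-- ===== LEMMAS AND PROOFS =====

-- Array.getD agrees with List.getD on toList
theorem arr_getD (a : Array String) (k : Nat) : a.getD k "" = a.toList.getD k "" := by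
  rw [Array.getD_eq_getD_getElem?, List.getD_eq_getElem?_getD, Array.getElem?_toList]

-- pushing both suffixes of every element, driven by an index loop, is one doubling step
theorem idx_fold (l : List String) : ∀ (acc : Array String),
    ((List.range l.length).foldl
        (fun t k => (t.push (l.getD k "" ++ "-1")).push (l.getD k "" ++ "1")) acc).toList
      = acc.toList ++ l.flatMap (fun p => [p ++ "-1", p ++ "1"]) := by
  induction l with
  | nil => intro acc; simp
  | cons p l ih =>
    intro acc
    rw [List.length_cons, List.range_succ_eq_map, List.foldl_cons, List.foldl_map]
    simp only [List.getD_cons_zero, List.getD_cons_succ]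
    rw [ih]
    simp

-- A's inner loop over indices is exactly one doubling step
theorem bits_inner_step (ps : Array String) :
    ((PySem.List.pyRange 0 (ps.size : Int) 1).foldl
        (fun ps_temp i =>
          (ps_temp.push (ps.getD i.toNat "" ++ "-1")).push (ps.getD i.toNat "" ++ "1"))
        #[]).toList
      = ps.toList.flatMap (fun p => [p ++ "-1", p ++ "1"]) := by
  rw [PySem.List.pyRange_zero_natCast, List.foldl_map]
  simp only [Int.toNat_natCast, arr_getD]
  rw [show ps.size = ps.toList.length from (Array.length_toList (xs := ps)).symm, idx_fold]
  simp

-- iterating A's loop k more times from stage j doubles k more times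
theorem bits_iter (k : Nat) : ∀ (j : Nat) (a : Int) (ps0 : Array String),
    ps0.toList = bitsPatternsAux (j + 1) →
    ((PySem.List.pyRange a (a + k) 1).foldl
        (fun ps _ =>
          (PySem.List.pyRange 0 (ps.size : Int) 1).foldl
            (fun ps_temp i =>
              (ps_temp.push (ps.getD i.toNat "" ++ "-1")).push (ps.getD i.toNat "" ++ "1"))
            #[])
        ps0).toList
      = bitsPatternsAux (j + 1 + k) := by
  induction k with
  | zero => intro j a ps0 h0; simpa [PySem.List.pyRange_zero] using h0
  | succ m ih =>
    intro j a ps0 h0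
    rw [PySem.List.pyRange_one_cons (by omega : a < a + ((m : Nat) + 1 : Nat))]
    simp only [List.foldl_cons]
    have e1 : (a + ((m : Nat) + 1 : Nat) : Int) = (a + 1) + (m : Nat) := by push_cast; ring
    rw [e1, ih (j + 1) (a + 1) _ (by rw [bits_inner_step, h0]; rfl)]
    congr 1
    omega

-- ===== VERDICT (by name: the statement is the Claim_ definition above) =====
theorem bits_patterns_spec : Claim_equal_bits_patterns := by
  intro n _
  unfold Spec_bits_patterns bits_patterns bits_patterns_alt
  by_cases h : n ≤ 1
  · have : PySem.List.pyRange 0 (n - 1) 1 = [] := by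
      rw [show n - 1 = 0 + (n - 1) from (by ring)]
      have : (n - 1 : Int) ≤ 0 := by omega
      simp [PySem.List.pyRange_one]
      omega
    rw [this]
    simp only [List.foldl_nil]
    have h01 : n.toNat = 0 ∨ n.toNat = 1 := by omega
    rcases h01 with h0 | h0 <;> rw [h0] <;> rfl
  · have hk : n - 1 = 0 + ((n - 1).toNat : Int) := by omega
    rw [hk, bits_iter (n - 1).toNat 0 0 #["-1", "1"] rfl]
    congr 1
    omega
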